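-- pv_equiv track=rewrite | github.com/charakageethal/grammar2fix | Codeflaws_GE_repair.py | findReplacable
-- ===== SOURCE A (Python) =====
-- import collections
--
-- def findReplacable(ftcase_fmins,new_fmin,multiple_inputs):
--     new_fmin_freq_list=collections.Counter(new_fmin)
--
--     if(multiple_inputs):
--         del new_fmin_freq_list["_"]
--
--     for ft_min in ftcase_fmins.keys():
--         if (ftcase_fmins[ft_min][0]=="All"):
--             ft_min_freq_list=collections.Counter(ft_min)
--
--             if(multiple_inputs):
--                 del ft_min_freq_list["_"]
--
--             if(list(new_fmin_freq_list.values())==list(ft_min_freq_list.values())):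
--                 char_pos_list={}
--
--                 for k in new_fmin_freq_list.keys():
--                     char_pos_list[k]=[i for i in range(len(new_fmin)) if new_fmin[i]==k]
--
--                 new_fmin_list=list(new_fmin)
--                 new_fmin_freq_key_list=list(new_fmin_freq_list.keys())
--                 ft_min_freq_key_list=list(ft_min_freq_list.keys())
--
--                 for i_ft_min_keys in range(len(ft_min_freq_key_list)):
--                     for char_pos in char_pos_list[new_fmin_freq_key_list[i_ft_min_keys]]:
--                         new_fmin_list[char_pos]=ft_min_freq_key_list[i_ft_min_keys]
--
--                 assigned_fmin="".join(new_fmin_list)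
--
--                 if(assigned_fmin==ft_min):
--                     return ft_min
--     return None
-- ===== SOURCE B (Python) =====
-- def findReplacable(ftcase_fmins, new_fmin, multiple_inputs):
--     n = len(new_fmin)
--     for ft_min, val in ftcase_fmins.items():
--         if val[0] != "All":
--             continue
--         if len(ft_min) != n:
--             continue
--         if multiple_inputs and any((new_fmin[i] == "_") != (ft_min[i] == "_") for i in range(n)):
--             continue
--         if all((new_fmin[i] == new_fmin[j]) == (ft_min[i] == ft_min[j])
--                for i in range(n) for j in range(i + 1, n)):
--             return ft_min
--     return None
-- ===== Notes on version B (the rewrite author's own statement) =====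
-- stated objective: simpler
-- what changed: Replaces A's Counter frequency-list comparison plus positional re-substitution through three intermediate dicts/lists by a direct pairwise equality-pattern check (s[i]==s[j] iff t[i]==t[j], with '_' positions required to coincide under multiple_inputs), with no auxiliary dictionaries at all; Pre_ excludes exactly the inputs where the scan reaches an empty value list, on which both A and B raise IndexError on val[0].
import Mathlib
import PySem

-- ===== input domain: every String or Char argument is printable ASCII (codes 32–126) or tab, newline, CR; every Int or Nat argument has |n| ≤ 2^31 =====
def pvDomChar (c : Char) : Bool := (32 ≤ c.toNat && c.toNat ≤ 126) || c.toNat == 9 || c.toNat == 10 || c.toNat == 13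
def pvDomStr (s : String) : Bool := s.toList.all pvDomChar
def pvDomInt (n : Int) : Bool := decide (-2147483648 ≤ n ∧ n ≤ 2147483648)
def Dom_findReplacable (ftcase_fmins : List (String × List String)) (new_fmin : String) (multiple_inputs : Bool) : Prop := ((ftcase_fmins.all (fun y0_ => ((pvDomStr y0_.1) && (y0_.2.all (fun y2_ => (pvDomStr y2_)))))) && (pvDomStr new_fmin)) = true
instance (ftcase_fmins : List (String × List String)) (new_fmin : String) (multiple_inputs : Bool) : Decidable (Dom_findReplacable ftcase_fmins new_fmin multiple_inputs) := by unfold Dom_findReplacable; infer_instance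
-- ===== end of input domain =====

-- B replaces A's Counter-frequency comparison and positional re-substitution through three
-- auxiliary dicts/lists by a direct pairwise equality-pattern scan (objective: simpler).

-- ===== PORT A =====
-- A's per-key body: Counter(ft_min) (minus '_' under multiple_inputs), value-list comparison,
-- char_pos_list dict, positional re-substitution, final string comparison.
def pvAMatch (nf : PySem.Dict Char Int) (s t : List Char) (m : Bool) : Bool :=
  let cf0 := PySem.Dict.counter t
  let cf := if m then cf0.erase '_' else cf0
  if nf.values == cf.values then
    let cp := nf.keys.foldl (fun d k =>
      d.insert k ((PySem.List.pyRange 0 (s.length : Int)).filter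
        (fun i => PySem.List.pyGet? s i == some k))) PySem.Dict.empty
    let nk := nf.keys
    let fk := cf.keys
    let assigned := (PySem.List.pyRange 0 (fk.length : Int)).foldl (fun l i =>
      (cp.getD (nk.getD i.toNat ' ') []).foldl (fun l pos => l.set pos.toNat (fk.getD i.toNat ' ')) l) s
    assigned == t
  else false

-- the for-loop over ftcase_fmins.keys(); `d.getD k []` is Python's `ftcase_fmins[ft_min]`
-- (exact: k comes from d.keys).  `pyGet? v 0 = none` is Python's IndexError on `[...][0]`
-- (excluded by Pre_); the port stops with none there.
def pvAGo (d : PySem.Dict String (List String)) (ks : List String)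
    (nf : PySem.Dict Char Int) (s : List Char) (m : Bool) : Option String :=
  match ks with
  | [] => none
  | k :: rest =>
    match PySem.List.pyGet? (d.getD k []) 0 with
    | none => none
    | some v0 =>
      if v0 == "All" then
        if pvAMatch nf s k.toList m then some k else pvAGo d rest nf s m
      else pvAGo d rest nf s m

def findReplacable (ftcase_fmins : List (String × List String)) (new_fmin : String) (multiple_inputs : Bool) : Option String :=
  let nf0 := PySem.Dict.counter new_fmin.toList
  let nf := if multiple_inputs then nf0.erase '_' else nf0   -- Counter.__delitem__ never raises
  let d := PySem.Dict.ofList ftcase_fmins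
  pvAGo d d.keys nf new_fmin.toList multiple_inputs

-- ===== PORT B =====
-- B's per-key test: same length, '_' positions coincide under multiple_inputs, and the
-- pairwise equality pattern agrees: s[i]==s[j] iff t[i]==t[j].
def pvBMatch (s t : List Char) (m : Bool) : Bool :=
  (t.length == s.length) &&
  !(m && ((PySem.List.pyRange 0 (s.length : Int)).any (fun i =>
      (PySem.List.pyGet? s i == some '_') != (PySem.List.pyGet? t i == some '_')))) &&
  ((PySem.List.pyRange 0 (s.length : Int)).all (fun i =>
      (PySem.List.pyRange (i + 1) (s.length : Int)).all (fun j =>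
        (PySem.List.pyGet? s i == PySem.List.pyGet? s j) ==
        (PySem.List.pyGet? t i == PySem.List.pyGet? t j))))

-- the for-loop over ftcase_fmins.items(); `pyGet? val 0 = none` is Python's IndexError
-- on `val[0]` (excluded by Pre_)
def pvBGo (items : List (String × List String)) (s : List Char) (m : Bool) : Option String :=
  match items with
  | [] => none
  | (t, val) :: rest =>
    match PySem.List.pyGet? val 0 with
    | none => none
    | some v0 =>
      if v0 == "All" && pvBMatch s t.toList m then some t else pvBGo rest s m

def findReplacable_alt (ftcase_fmins : List (String × List String)) (new_fmin : String) (multiple_inputs : Bool) : Option String :=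
  pvBGo (PySem.Dict.ofList ftcase_fmins).items new_fmin.toList multiple_inputs

-- ===== PRECONDITION & SPEC =====
-- Independent statement (for Pre_ only) of when the scan RETURNS at an entry: value list starts
-- with "All" and the key is pattern-isomorphic to new_fmin ('_' positions coinciding under
-- multiple_inputs).  Written over plain list indexing; neither port's code is reused.
def pvIsoB (s t : List Char) (m : Bool) : Bool :=
  (t.length == s.length) &&
  (!m || (List.range s.length).all (fun q => (s[q]? == some '_') == (t[q]? == some '_'))) &&
  ((List.range s.length).all (fun i => (List.range s.length).all (fun j =>
      (s[i]? == s[j]?) == (t[i]? == t[j]?))))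

def pvRetB (s : List Char) (m : Bool) (p : String × List String) : Bool :=
  (p.2.head? == some "All") && pvIsoB s p.1.toList m

-- Pre_ excludes EXACTLY the inputs on which the Python raises IndexError on `val[0]`: those
-- whose (deduplicated) dict has an empty value list at some position not preceded by an entry
-- at which the loop returns.  On every input admitted by Pre_, A returns normally.
def Pre_findReplacable (ftcase_fmins : List (String × List String)) (new_fmin : String) (multiple_inputs : Bool) : Prop :=
  ∀ j < (PySem.Dict.ofList ftcase_fmins).items.length,
    ((PySem.Dict.ofList ftcase_fmins).items.getD j ("", [])).2 = [] →
    ∃ i < j, pvRetB new_fmin.toList multiple_inputs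
      ((PySem.Dict.ofList ftcase_fmins).items.getD i ("", [])) = true
instance (ftcase_fmins : List (String × List String)) (new_fmin : String) (multiple_inputs : Bool) : Decidable (Pre_findReplacable ftcase_fmins new_fmin multiple_inputs) := by unfold Pre_findReplacable; infer_instance

def pvWitness_findReplacable : (List (String × List String)) × String × Bool :=
  ([("ab", ["All"])], "xy", false)

def Spec_findReplacable (ftcase_fmins : List (String × List String)) (new_fmin : String) (multiple_inputs : Bool) (out : Option String) : Prop := out = findReplacable_alt ftcase_fmins new_fmin multiple_inputs
instance (ftcase_fmins : List (String × List String)) (new_fmin : String) (multiple_inputs : Bool) (out : Option String) : Decidable (Spec_findReplacable ftcase_fmins new_fmin multiple_inputs out) := by unfold Spec_findReplacable; infer_instance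

-- ===== CLAIM (what is proved, stated in full; the proofs are below) =====
def Claim_equal_findReplacable : Prop := ∀ (ftcase_fmins : List (String × List String)) (new_fmin : String) (multiple_inputs : Bool), Dom_findReplacable ftcase_fmins new_fmin multiple_inputs → Pre_findReplacable ftcase_fmins new_fmin multiple_inputs → Spec_findReplacable ftcase_fmins new_fmin multiple_inputs (findReplacable ftcase_fmins new_fmin multiple_inputs)

-- ===== LEMMAS AND PROOFS =====

-- A's new_fmin-side counter (built once, before the loop)
def pvNF (s : List Char) (m : Bool) : PySem.Dict Char Int :=
  if m then (PySem.Dict.counter s).erase '_' else PySem.Dict.counter s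

-- the distinct chars of s in first-occurrence order, minus '_' under m (= A's counter keys)
def pvU (s : List Char) (m : Bool) : List Char :=
  if m then (PySem.Set.ofList s).filter (fun c => !(c == '_')) else PySem.Set.ofList s

-- what A's re-substitution writes at position q
def pvModel (s t : List Char) (m : Bool) (q : Nat) : Option Char :=
  match (List.range (pvU t m).length).find? (fun i => s[q]? == some ((pvU s m).getD i ' ')) with
  | some i => some ((pvU t m).getD i ' ')
  | none => s[q]?

def pvPW (s t : List Char) : Prop := ∀ i j : Nat, (s[i]? = s[j]?) ↔ (t[i]? = t[j]?)
def pvAL (s t : List Char) : Prop := ∀ q : Nat, (s[q]? = some '_') ↔ (t[q]? = some '_')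

def pvACond (s t : List Char) (m : Bool) : Prop :=
  ((pvU s m).map (fun c => (s.count c : Int)) = (pvU t m).map (fun c => (t.count c : Int))) ∧
  t.length = s.length ∧ (∀ q, t[q]? = pvModel s t m q)

def pvBCond (s t : List Char) (m : Bool) : Prop :=
  t.length = s.length ∧ (m = true → pvAL s t) ∧ pvPW s t

-- positions of c in s
def pvPosN (s : List Char) (c : Char) : List Nat :=
  (List.range s.length).filter (fun k => s[k]? == some c)

-- first-occurrence positions of s
def pvFP (s : List Char) : List Nat :=
  (List.range s.length).filter (fun p => (List.range p).all (fun q => !(s[q]? == s[p]?)))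

lemma pvNF_items (s : List Char) (m : Bool) :
    (pvNF s m).items = (pvU s m).map (fun k => (k, (s.count k : Int))) := by
  cases m
  · simp [pvNF, pvU, PySem.Dict.items_counter]
  · simp only [pvNF, pvU, if_pos, PySem.Dict.erase, PySem.Dict.items_counter, List.filter_map]
    rfl

lemma pvNF_keys (s : List Char) (m : Bool) : (pvNF s m).keys = pvU s m := by
  show (pvNF s m).items.map (·.1) = pvU s m
  rw [pvNF_items, List.map_map]
  exact List.map_id'' (congrFun rfl) _

lemma pvNF_values (s : List Char) (m : Bool) :
    (pvNF s m).values = (pvU s m).map (fun k => (s.count k : Int)) := by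
  show (pvNF s m).items.map (·.2) = _
  rw [pvNF_items, List.map_map]
  rfl

lemma pvU_nodup (s : List Char) (m : Bool) : (pvU s m).Nodup := by
  cases m
  · exact PySem.Set.nodup_ofList s
  · exact (PySem.Set.nodup_ofList s).filter _

lemma pvU_mem (s : List Char) (m : Bool) (c : Char) :
    c ∈ pvU s m ↔ c ∈ s ∧ (m = true → c ≠ '_') := by
  cases m
  · simp [pvU, PySem.Set.mem_ofList]
  · simp [pvU, List.mem_filter, PySem.Set.mem_ofList]

lemma pvFoldSet_length (K : List Nat) (c' : Char) (l : List Char) :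
    (K.foldl (fun l k => l.set k c') l).length = l.length := by
  induction K generalizing l with
  | nil => rfl
  | cons k K' ih => rw [List.foldl_cons, ih, List.length_set]

lemma pvFoldSet_getElem? (K : List Nat) (c' : Char) (l : List Char) (q : Nat) :
    (K.foldl (fun l k => l.set k c') l)[q]? = if q ∈ K ∧ q < l.length then some c' else l[q]? := by
  induction K generalizing l with
  | nil => simp
  | cons k K' ih =>
    rw [List.foldl_cons, ih, List.getElem?_set, List.length_set]
    by_cases h1 : q ∈ K' ∧ q < l.length
    · simp [h1, List.mem_cons]
    · rw [if_neg h1]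
      by_cases h2 : k = q
      · subst h2
        by_cases h3 : k < l.length
        · simp [h3]
        · simp [h3]
      · rw [if_neg h2, if_neg (by
          rintro ⟨hmem, hlt⟩
          rcases List.mem_cons.1 hmem with h | h
          · exact h2 h.symm
          · exact h1 ⟨h, hlt⟩)]

lemma pvPosN_mem (s : List Char) (c : Char) (q : Nat) :
    q ∈ pvPosN s c ↔ q < s.length ∧ s[q]? = some c := by
  simp [pvPosN, List.mem_filter, List.mem_range]

lemma pvInner (s : List Char) (c c' : Char) (l : List Char) (hl : l.length = s.length) (q : Nat) :
    ((pvPosN s c).foldl (fun l k => l.set k c') l)[q]? = if s[q]? = some c then some c' else l[q]? := by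
  rw [pvFoldSet_getElem?]
  by_cases h : s[q]? = some c
  · have hq : q < s.length := by
      rcases List.getElem?_eq_some_iff.1 h with ⟨hlt, _⟩
      exact hlt
    simp [pvPosN_mem, h, hq, hl]
  · simp [pvPosN_mem, h]

lemma pvOuter (s uS uT : List Char) (hS : uS.Nodup) (J : List Nat)
    (hJ : ∀ i ∈ J, i < uS.length) (l : List Char) (hl : l.length = s.length) (q : Nat) :
    (J.foldl (fun l i => (pvPosN s (uS.getD i ' ')).foldl (fun l k => l.set k (uT.getD i ' ')) l) l)[q]?
      = match J.find? (fun i => s[q]? == some (uS.getD i ' ')) with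
        | some i => some (uT.getD i ' ')
        | none => l[q]? := by
  induction J generalizing l with
  | nil => simp
  | cons i0 J' ih =>
    rw [List.foldl_cons, List.find?_cons]
    have hlen' : ((pvPosN s (uS.getD i0 ' ')).foldl (fun l k => l.set k (uT.getD i0 ' ')) l).length = s.length := by
      rw [pvFoldSet_length]; exact hl
    rw [ih (fun i hi => hJ i (List.mem_cons_of_mem _ hi)) _ hlen']
    by_cases hc : (s[q]? == some (uS.getD i0 ' ')) = true
    · rw [hc]
      cases hfind : J'.find? (fun i => s[q]? == some (uS.getD i ' ')) with
      | none =>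
        simp only [hfind]
        rw [pvInner s _ _ l hl q, if_pos (beq_iff_eq.1 hc)]
      | some i1 =>
        simp only [hfind]
        have hp := beq_iff_eq.1 (List.find?_some (p := fun i => s[q]? == some (uS.getD i ' ')) hfind)
        have hm := List.mem_of_find?_eq_some hfind
        have hi1 : i1 < uS.length := hJ i1 (List.mem_cons_of_mem _ hm)
        have hi0 : i0 < uS.length := hJ i0 List.mem_cons_self
        have e1 : uS.getD i1 ' ' = uS.getD i0 ' ' := by
          have h1 := beq_iff_eq.1 hc
          rw [hp] at h1
          exact Option.some_injective _ h1
        have e2 : i1 = i0 := by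
          rw [List.getD_eq_getElem?_getD, List.getD_eq_getElem?_getD,
            List.getElem?_eq_getElem hi1, List.getElem?_eq_getElem hi0] at e1
          exact (List.Nodup.getElem_inj_iff hS).1 (by simpa using e1)
        rw [e2]
    · rw [Bool.not_eq_true] at hc
      rw [hc]
      cases hfind : J'.find? (fun i => s[q]? == some (uS.getD i ' ')) with
      | none =>
        simp only [hfind]
        rw [pvInner s _ _ l hl q, if_neg (by simpa using hc)]
      | some i1 => simp only [hfind]

lemma pvOuterLength (s uS uT : List Char) (J : List Nat) (l : List Char) :
    (J.foldl (fun l i => (pvPosN s (uS.getD i ' ')).foldl (fun l k => l.set k (uT.getD i ' ')) l) l).length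
      = l.length := by
  induction J generalizing l with
  | nil => rfl
  | cons i0 J' ih => rw [List.foldl_cons, ih, pvFoldSet_length]

lemma pvPortPos (s : List Char) (c : Char) :
    (PySem.List.pyRange 0 (s.length : Int)).filter (fun i => PySem.List.pyGet? s i == some c)
      = (pvPosN s c).map Nat.cast := by
  rw [PySem.List.pyRange_zero_natCast, List.filter_map]
  congr 1
  apply List.filter_congr
  intro x _
  simp [Function.comp, PySem.List.pyGet?_natCast]

lemma pvCP (s : List Char) (m : Bool) (c : Char) (hc : c ∈ pvU s m) :
    ((pvU s m).foldl (fun d k => d.insert k ((PySem.List.pyRange 0 (s.length : Int)).filter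
        (fun i => PySem.List.pyGet? s i == some k))) PySem.Dict.empty).getD c []
      = (pvPosN s c).map Nat.cast := by
  have hitems := PySem.Dict.items_foldl_insert_fresh (pvU s m) id
    (fun k => (PySem.List.pyRange 0 (s.length : Int)).filter (fun i => PySem.List.pyGet? s i == some k))
    PySem.Dict.empty (fun a _ => PySem.Dict.contains_empty a) (by simpa using pvU_nodup s m)
  simp only [id] at hitems
  rw [← pvPortPos s c]
  apply PySem.Dict.getD_of_mem_items
  · rw [hitems]
    have : PySem.Dict.empty.items (κ := Char) (ν := List Int) = [] := rfl
    rw [this, List.nil_append]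
    exact List.mem_map_of_mem hc
  · show (_ : PySem.Dict Char (List Int)).items.map (·.1) |>.Nodup
    rw [hitems]
    have : PySem.Dict.empty.items (κ := Char) (ν := List Int) = [] := rfl
    rw [this, List.nil_append, List.map_map]
    have hid : ((fun x : Char × List Int => x.1) ∘ (fun a => (a, (PySem.List.pyRange 0 (s.length : Int)).filter
        (fun i => PySem.List.pyGet? s i == some a)))) = fun a => a := rfl
    rw [hid, List.map_id']
    exact pvU_nodup s m

lemma pvAMatch_iff (s t : List Char) (m : Bool) :
    pvAMatch (pvNF s m) s t m = true ↔ pvACond s t m := by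
  simp only [pvAMatch]
  have hcf : (if m then (PySem.Dict.counter t).erase '_' else PySem.Dict.counter t) = pvNF t m := by
    cases m <;> rfl
  rw [hcf, pvNF_values s, pvNF_values t, pvNF_keys s, pvNF_keys t]
  unfold pvACond
  by_cases hv : (pvU s m).map (fun c => (s.count c : Int)) = (pvU t m).map (fun c => (t.count c : Int))
  · rw [if_pos (by simpa [beq_iff_eq] using hv)]
    have hLen : (pvU s m).length = (pvU t m).length := by
      have := congrArg List.length hv
      simpa using this
    have hbody : ∀ (acc : List Char), ∀ k ∈ List.range (pvU t m).length,
        ((((pvU s m).foldl (fun d k => d.insert k ((PySem.List.pyRange 0 (s.length : Int)).filter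
            (fun i => PySem.List.pyGet? s i == some k))) PySem.Dict.empty).getD
              ((pvU s m).getD ((k : Int)).toNat ' ') []).foldl
            (fun l pos => l.set pos.toNat ((pvU t m).getD ((k : Int)).toNat ' ')) acc)
          = (pvPosN s ((pvU s m).getD k ' ')).foldl
              (fun l p => l.set p ((pvU t m).getD k ' ')) acc := by
      intro acc k hk
      have hk' : k < (pvU s m).length := by
        rw [hLen]; exact List.mem_range.1 hk
      have hmem : (pvU s m).getD k ' ' ∈ pvU s m := by
        rw [List.getD_eq_getElem?_getD, List.getElem?_eq_getElem hk']
        exact List.getElem_mem hk'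
      rw [Int.toNat_natCast, pvCP s m _ hmem, List.foldl_map]
      simp only [Int.toNat_natCast]
    rw [PySem.List.pyRange_zero_natCast ((pvU t m).length), List.foldl_map]
    rw [PySem.List.foldl_congr_mem _ _ _ _ hbody, beq_iff_eq]
    have hJ : ∀ i ∈ List.range (pvU t m).length, i < (pvU s m).length := by
      intro i hi; rw [hLen]; exact List.mem_range.1 hi
    have houter := pvOuter s (pvU s m) (pvU t m) (pvU_nodup s m) (List.range (pvU t m).length) hJ s rfl
    constructor
    · intro h
      refine ⟨hv, ?_, ?_⟩
      · rw [← h, pvOuterLength]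
      · intro q
        have hq := houter q
        rw [h] at hq
        exact hq.trans rfl
    · rintro ⟨_, hlen, hmod⟩
      apply List.ext_getElem?
      intro q
      rw [houter q, hmod q]
      rfl
  · rw [if_neg (by simpa [beq_iff_eq] using hv)]
    simp [hv]

lemma pvAL_of_bounded (s t : List Char) (hlen : t.length = s.length)
    (h : ∀ q < s.length, (s[q]? = some '_') ↔ (t[q]? = some '_')) : pvAL s t := by
  intro q
  by_cases hq : q < s.length
  · exact h q hq
  · have hq' : s.length ≤ q := Nat.le_of_not_lt hq
    rw [List.getElem?_eq_none hq', List.getElem?_eq_none (show t.length ≤ q from hlen ▸ hq')]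

lemma pvPW_of_bounded (s t : List Char) (hlen : t.length = s.length)
    (h : ∀ i < s.length, ∀ j < s.length, i < j → ((s[i]? = s[j]?) ↔ (t[i]? = t[j]?))) : pvPW s t := by
  have hsym : ∀ i < s.length, ∀ j < s.length, ((s[i]? = s[j]?) ↔ (t[i]? = t[j]?)) := by
    intro i hi j hj
    rcases lt_trichotomy i j with hij | hij | hij
    · exact h i hi j hj hij
    · subst hij; simp
    · rw [eq_comm (a := s[i]?), eq_comm (a := t[i]?)]
      exact h j hj i hi hij
  intro i j
  by_cases hi : i < s.length <;> by_cases hj : j < s.length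
  · exact hsym i hi j hj
  · have hj' : s.length ≤ j := Nat.le_of_not_lt hj
    rw [List.getElem?_eq_none hj', List.getElem?_eq_none (show t.length ≤ j from hlen ▸ hj'),
      List.getElem?_eq_getElem hi, List.getElem?_eq_getElem (show i < t.length from hlen ▸ hi)]
    simp
  · have hi' : s.length ≤ i := Nat.le_of_not_lt hi
    rw [List.getElem?_eq_none hi', List.getElem?_eq_none (show t.length ≤ i from hlen ▸ hi'),
      List.getElem?_eq_getElem hj, List.getElem?_eq_getElem (show j < t.length from hlen ▸ hj)]
    simp
  · have hi' : s.length ≤ i := Nat.le_of_not_lt hi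
    have hj' : s.length ≤ j := Nat.le_of_not_lt hj
    rw [List.getElem?_eq_none hi', List.getElem?_eq_none hj',
      List.getElem?_eq_none (show t.length ≤ i from hlen ▸ hi'),
      List.getElem?_eq_none (show t.length ≤ j from hlen ▸ hj')]

lemma pvBMatch_iff (s t : List Char) (m : Bool) :
    pvBMatch s t m = true ↔ pvBCond s t m := by
  unfold pvBMatch pvBCond pvAL pvPW
  rw [Bool.and_eq_true, Bool.and_eq_true, beq_iff_eq,
    PySem.List.pyRange_zero_natCast, List.any_map, List.all_map,
    Bool.not_eq_true', Bool.and_eq_false_iff, List.all_eq_true]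
  constructor
  · rintro ⟨⟨hlen, hAL⟩, hPW⟩
    refine ⟨hlen, ?_, ?_⟩
    · intro hm
      rcases hAL with hAL | hAL
      · rw [hm] at hAL; cases hAL
      · rw [List.any_eq_false] at hAL
        apply pvAL_of_bounded s t hlen
        intro q hq
        have hh := hAL q (List.mem_range.2 hq)
        simp only [Function.comp, Bool.not_eq_true, bne_eq_false_iff_eq,
          PySem.List.pyGet?_natCast] at hh
        rw [Bool.eq_iff_iff, beq_iff_eq, beq_iff_eq] at hh
        exact hh
    · apply pvPW_of_bounded s t hlen
      intro i hi j hj hij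
      have h1 := hPW i (List.mem_range.2 hi)
      simp only [Function.comp] at h1
      rw [List.all_eq_true] at h1
      have h2 := h1 (j : Int) (PySem.List.mem_pyRange_one.2 (by constructor <;> [omega; exact_mod_cast hj]))
      simp only [PySem.List.pyGet?_natCast] at h2
      rw [beq_iff_eq, Bool.eq_iff_iff, beq_iff_eq, beq_iff_eq] at h2
      exact h2
  · rintro ⟨hlen, hAL, hPW⟩
    refine ⟨⟨hlen, ?_⟩, ?_⟩
    · cases m with
      | false => left; rfl
      | true =>
        right
        rw [List.any_eq_false]
        intro k _
        simp only [Function.comp, Bool.not_eq_true, bne_eq_false_iff_eq,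
          PySem.List.pyGet?_natCast]
        rw [Bool.eq_iff_iff, beq_iff_eq, beq_iff_eq]
        exact hAL rfl k
    · intro k _
      simp only [Function.comp]
      rw [List.all_eq_true]
      intro x hx
      rw [PySem.List.mem_pyRange_one] at hx
      obtain ⟨j, rfl⟩ : ∃ j : Nat, x = (j : Int) := ⟨x.toNat, (Int.toNat_of_nonneg (by omega)).symm⟩
      simp only [PySem.List.pyGet?_natCast]
      rw [beq_iff_eq, Bool.eq_iff_iff, beq_iff_eq, beq_iff_eq]
      exact hPW k j

-- Pre_'s independent isomorphism test agrees with B's per-key test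
lemma pvIsoB_iff (s t : List Char) (m : Bool) :
    pvIsoB s t m = true ↔ pvBCond s t m := by
  unfold pvIsoB pvBCond
  rw [Bool.and_eq_true, Bool.and_eq_true, beq_iff_eq, Bool.or_eq_true,
    Bool.not_eq_true', List.all_eq_true, List.all_eq_true]
  constructor
  · rintro ⟨⟨hlen, hAL⟩, hPW⟩
    refine ⟨hlen, ?_, ?_⟩
    · intro hm
      rcases hAL with hAL | hAL
      · rw [hm] at hAL; cases hAL
      · apply pvAL_of_bounded s t hlen
        intro q hq
        have hh := hAL q (List.mem_range.2 hq)
        rw [beq_iff_eq, Bool.eq_iff_iff, beq_iff_eq, beq_iff_eq] at hh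
        exact hh
    · apply pvPW_of_bounded s t hlen
      intro i hi j hj _
      have h1 := hPW i (List.mem_range.2 hi)
      rw [List.all_eq_true] at h1
      have h2 := h1 j (List.mem_range.2 hj)
      rw [beq_iff_eq, Bool.eq_iff_iff, beq_iff_eq, beq_iff_eq] at h2
      exact h2
  · rintro ⟨hlen, hAL, hPW⟩
    refine ⟨⟨hlen, ?_⟩, ?_⟩
    · cases m with
      | false => left; rfl
      | true =>
        right
        intro q _
        rw [beq_iff_eq, Bool.eq_iff_iff, beq_iff_eq, beq_iff_eq]
        exact hAL rfl q
    · intro i _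
      rw [List.all_eq_true]
      intro j _
      rw [beq_iff_eq, Bool.eq_iff_iff, beq_iff_eq, beq_iff_eq]
      exact hPW i j

lemma pvIsoB_eq_pvBMatch (s t : List Char) (m : Bool) : pvIsoB s t m = pvBMatch s t m := by
  rcases h : pvBMatch s t m
  · rcases h2 : pvIsoB s t m
    · rfl
    · exact absurd ((pvBMatch_iff s t m).2 ((pvIsoB_iff s t m).1 h2)) (by simp [h])
  · exact (pvIsoB_iff s t m).2 ((pvBMatch_iff s t m).1 h)

lemma pvU_no_underscore (s : List Char) : '_' ∉ pvU s true := by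
  simp [pvU, List.mem_filter]

lemma pvGetD_mem {α : Type} (u : List α) (d : α) (i : Nat) (hi : i < u.length) :
    u.getD i d ∈ u := by
  rw [List.getD_eq_getElem?_getD, List.getElem?_eq_getElem hi]
  exact List.getElem_mem hi

lemma pvModel_none (s t : List Char) (m : Bool) (q : Nat) (h : s[q]? = none) :
    pvModel s t m q = none := by
  unfold pvModel
  rw [List.find?_eq_none.2 (by intro i _; simp [h])]
  exact h

lemma pvModel_not_mem (s t : List Char) (m : Bool) (q : Nat) (c : Char)
    (hq : s[q]? = some c) (hc : c ∉ pvU s m)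
    (hLen : (pvU s m).length = (pvU t m).length) :
    pvModel s t m q = s[q]? := by
  unfold pvModel
  rw [List.find?_eq_none.2]
  intro i hi
  rw [List.mem_range] at hi
  have hi' : i < (pvU s m).length := by omega
  simp only [hq, beq_iff_eq, Option.some.injEq]
  intro he
  exact hc (he ▸ pvGetD_mem _ _ _ hi')

lemma pvModel_mem (s t : List Char) (m : Bool) (q : Nat) (c : Char)
    (hq : s[q]? = some c) (hc : c ∈ pvU s m)
    (hLen : (pvU s m).length = (pvU t m).length) :
    ∃ i, i < (pvU t m).length ∧ (pvU s m).getD i ' ' = c ∧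
      pvModel s t m q = some ((pvU t m).getD i ' ') := by
  unfold pvModel
  cases hfind : (List.range (pvU t m).length).find? (fun i => s[q]? == some ((pvU s m).getD i ' ')) with
  | none =>
    exfalso
    have hidx : List.idxOf c (pvU s m) < (pvU t m).length := by
      have := List.idxOf_lt_length_of_mem hc
      omega
    have := List.find?_eq_none.1 hfind (List.idxOf c (pvU s m)) (List.mem_range.2 hidx)
    apply this
    have hgd : (pvU s m).getD (List.idxOf c (pvU s m)) ' ' = c := by
      rw [List.getD_eq_getElem?_getD,
        List.getElem?_eq_getElem (List.idxOf_lt_length_of_mem hc)]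
      simp [List.getElem_idxOf]
    rw [hgd, hq]
    simp
  | some i =>
    have hp := List.find?_some (p := fun i => s[q]? == some ((pvU s m).getD i ' ')) hfind
    have hm := List.mem_of_find?_eq_some hfind
    refine ⟨i, List.mem_range.1 hm, ?_, rfl⟩
    rw [hq] at hp
    exact (Option.some_injective _ (beq_iff_eq.1 hp)).symm

lemma pvMem_cases (s : List Char) (m : Bool) (c : Char) (hcs : c ∈ s) (hc : c ∉ pvU s m) :
    m = true ∧ c = '_' := by
  rw [pvU_mem] at hc
  cases m with
  | false => exact absurd ⟨hcs, by simp⟩ hc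
  | true =>
    refine ⟨rfl, ?_⟩
    by_contra hne
    exact hc ⟨hcs, fun _ => hne⟩

lemma pvCond_mp (s t : List Char) (m : Bool) : pvACond s t m → pvBCond s t m := by
  rintro ⟨hv, hlen, hmod⟩
  have hLen : (pvU s m).length = (pvU t m).length := by
    have := congrArg List.length hv
    simpa using this
  refine ⟨hlen, ?_, ?_⟩
  · rintro rfl q
    constructor
    · intro hsq
      rw [hmod q, pvModel_not_mem s t true q '_' hsq (pvU_no_underscore s) hLen]
      exact hsq
    · intro htq
      cases hsq : s[q]? with
      | none =>
        rw [hmod q, pvModel_none s t true q hsq] at htq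
        cases htq
      | some c =>
        by_cases hcu : c = '_'
        · rw [hcu]
        · exfalso
          have hcm : c ∈ pvU s true :=
            (pvU_mem s true c).2 ⟨List.mem_of_getElem? hsq, fun _ => hcu⟩
          obtain ⟨i, hi, _, hmq⟩ := pvModel_mem s t true q c hsq hcm hLen
          rw [hmod q, hmq] at htq
          have h1 := Option.some_injective _ htq
          exact pvU_no_underscore t (h1 ▸ pvGetD_mem _ _ _ hi)
  · intro i j
    cases hsi : s[i]? with
    | none =>
      cases hsj : s[j]? with
      | none =>
        rw [hmod i, hmod j, pvModel_none s t m i hsi, pvModel_none s t m j hsj]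
      | some d =>
        rw [hmod i, hmod j, pvModel_none s t m i hsi]
        by_cases hd : d ∈ pvU s m
        · obtain ⟨jj, hjj, _, hmq⟩ := pvModel_mem s t m j d hsj hd hLen
          rw [hmq]
          simp
        · rw [pvModel_not_mem s t m j d hsj hd hLen, hsj]
    | some c =>
      cases hsj : s[j]? with
      | none =>
        rw [hmod i, hmod j, pvModel_none s t m j hsj]
        by_cases hc : c ∈ pvU s m
        · obtain ⟨ii, hii, _, hmq⟩ := pvModel_mem s t m i c hsi hc hLen
          rw [hmq]
          simp
        · rw [pvModel_not_mem s t m i c hsi hc hLen, hsi]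
      | some d =>
        by_cases hc : c ∈ pvU s m <;> by_cases hd : d ∈ pvU s m
        · obtain ⟨ii, hii, hgi, hmi⟩ := pvModel_mem s t m i c hsi hc hLen
          obtain ⟨jj, hjj, hgj, hmj⟩ := pvModel_mem s t m j d hsj hd hLen
          rw [hmod i, hmod j, hmi, hmj]
          have hii' : ii < (pvU s m).length := by omega
          have hjj' : jj < (pvU s m).length := by omega
          rw [List.getD_eq_getElem?_getD, List.getElem?_eq_getElem hii'] at hgi
          rw [List.getD_eq_getElem?_getD, List.getElem?_eq_getElem hjj'] at hgj
          simp only [Option.getD_some] at hgi hgj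
          constructor
          · intro he
            have hcd : c = d := Option.some_injective _ he
            have : ii = jj := (List.Nodup.getElem_inj_iff (pvU_nodup s m)).1 (by rw [hgi, hgj, hcd])
            rw [this]
          · intro he
            have := Option.some_injective _ he
            rw [List.getD_eq_getElem?_getD, List.getElem?_eq_getElem hii,
              List.getD_eq_getElem?_getD, List.getElem?_eq_getElem hjj] at this
            simp only [Option.getD_some] at this
            have hij : ii = jj := (List.Nodup.getElem_inj_iff (pvU_nodup t m)).1 this
            subst hij
            rw [← hgi, ← hgj]
        · obtain ⟨hm, hd'⟩ := pvMem_cases s m d (List.mem_of_getElem? hsj) hd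
          subst hm; subst hd'
          obtain ⟨ii, hii, hgi, hmi⟩ := pvModel_mem s t true i c hsi hc hLen
          rw [hmod i, hmod j, hmi, pvModel_not_mem s t true j '_' hsj hd hLen, hsj]
          have h1 : c ≠ '_' := fun h => hd (h ▸ hc)
          have h2 : (pvU t true).getD ii ' ' ≠ '_' :=
            fun h => pvU_no_underscore t (h ▸ pvGetD_mem _ _ _ hii)
          rw [List.getD_eq_getElem?_getD] at h2
          simp [h1, h2]
        · obtain ⟨hm, hc'⟩ := pvMem_cases s m c (List.mem_of_getElem? hsi) hc
          subst hm; subst hc'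
          obtain ⟨jj, hjj, hgj, hmj⟩ := pvModel_mem s t true j d hsj hd hLen
          rw [hmod i, hmod j, hmj, pvModel_not_mem s t true i '_' hsi hc hLen, hsi]
          have h1 : d ≠ '_' := fun h => hc (h ▸ hd)
          have h2 : (pvU t true).getD jj ' ' ≠ '_' :=
            fun h => pvU_no_underscore t (h ▸ pvGetD_mem _ _ _ hjj)
          constructor
          · intro he
            exact absurd (Option.some_injective _ he).symm h1
          · intro he
            exact absurd (Option.some_injective _ he).symm h2
        · obtain ⟨hm, hc'⟩ := pvMem_cases s m c (List.mem_of_getElem? hsi) hc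
          obtain ⟨_, hd'⟩ := pvMem_cases s m d (List.mem_of_getElem? hsj) hd
          subst hm; subst hc'; subst hd'
          rw [hmod i, hmod j, pvModel_not_mem s t true i '_' hsi hc hLen,
            pvModel_not_mem s t true j '_' hsj hd hLen, hsi, hsj]

lemma pvFP_mem (s : List Char) (p : Nat) :
    p ∈ pvFP s ↔ p < s.length ∧ ∀ q < p, ¬ (s[q]? = s[p]?) := by
  simp [pvFP, List.mem_filter, List.mem_range, List.all_eq_true]

lemma pvCount (s : List Char) (c : Char) :
    s.count c = ((List.range s.length).filter (fun q => s[q]? == some c)).length := by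
  induction s with
  | nil => simp
  | cons a s' ih =>
    rw [List.count_cons, List.length_cons, List.range_succ_eq_map, List.filter_cons,
      List.filter_map]
    have hcomp : ((fun q => (a :: s')[q]? == some c) ∘ Nat.succ) = fun q => s'[q]? == some c := by
      funext q
      simp
    rw [hcomp]
    by_cases hac : a = c
    · simp [hac, ih]
    · simp only [List.getElem?_cons_zero]
      have : ((some a == some c) = false) := by simp [hac]
      simp [this, hac, ih]

lemma pvSet_concat (xs : List Char) (c : Char) :
    PySem.Set.ofList (xs ++ [c]) = if c ∈ xs then PySem.Set.ofList xs else PySem.Set.ofList xs ++ [c] := by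
  rw [PySem.Set.ofList_eq_foldl, List.foldl_append, ← PySem.Set.ofList_eq_foldl]
  show PySem.Set.add (PySem.Set.ofList xs) c = _
  unfold PySem.Set.add
  by_cases h : c ∈ xs
  · rw [if_pos h, if_pos]
    show PySem.Set.contains _ c = true
    unfold PySem.Set.contains
    simpa [PySem.Set.mem_ofList] using h
  · rw [if_neg h, if_neg]
    show ¬ PySem.Set.contains _ c = true
    unfold PySem.Set.contains
    simpa [PySem.Set.mem_ofList] using h

lemma pvFP_concat (xs : List Char) (c : Char) :
    pvFP (xs ++ [c]) = pvFP xs ++ (if c ∈ xs then [] else [xs.length]) := by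
  unfold pvFP
  rw [List.length_append, List.length_singleton, List.range_succ, List.filter_append]
  congr 1
  · apply List.filter_congr
    intro p hp
    rw [List.mem_range] at hp
    have h1 : ∀ q, q < p → (xs ++ [c])[q]? = xs[q]? := fun q hq =>
      List.getElem?_append_left (by omega)
    have h2 : (xs ++ [c])[p]? = xs[p]? := List.getElem?_append_left hp
    rw [Bool.eq_iff_iff]
    simp only [List.all_eq_true, List.mem_range]
    constructor
    · intro h q hq
      rw [← h1 q hq, ← h2]
      exact h q hq
    · intro h q hq
      rw [h1 q hq, h2]
      exact h q hq
  · have hc : (xs ++ [c])[xs.length]? = some c := List.getElem?_concat_length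
    simp only [List.filter_cons, List.filter_nil]
    by_cases h : c ∈ xs
    · rw [if_pos h, if_neg]
      simp only [List.all_eq_true, List.mem_range, Bool.not_eq_true']
      push Not
      obtain ⟨q, hq⟩ := List.mem_iff_getElem?.1 h
      have hqlt : q < xs.length := (List.getElem?_eq_some_iff.1 hq).1
      exact ⟨q, hqlt, by rw [List.getElem?_append_left hqlt, hc, hq]; simp⟩
    · rw [if_neg h, if_pos]
      rw [List.all_eq_true]
      intro q hq
      rw [List.mem_range] at hq
      rw [List.getElem?_append_left hq, hc]
      simp only [Bool.not_eq_eq_eq_not, Bool.not_true, beq_eq_false_iff_ne, ne_eq]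
      intro he
      exact h (List.mem_of_getElem? he)


lemma pvFP_ofList (s : List Char) :
    PySem.Set.ofList s = (pvFP s).map (fun p => s.getD p ' ') := by
  induction s using List.reverseRecOn with
  | nil => rfl
  | append_singleton xs c ih =>
    rw [pvSet_concat, pvFP_concat, List.map_append]
    have hmap : (pvFP xs).map (fun p => (xs ++ [c]).getD p ' ') = (pvFP xs).map (fun p => xs.getD p ' ') := by
      apply List.map_congr_left
      intro p hp
      have hplt : p < xs.length := ((pvFP_mem xs p).1 hp).1
      rw [List.getD_eq_getElem?_getD, List.getD_eq_getElem?_getD, List.getElem?_append_left hplt]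
    by_cases h : c ∈ xs
    · rw [if_pos h, if_pos h, hmap, ← ih, List.map_nil, List.append_nil]
    · rw [if_neg h, if_neg h, hmap, ← ih]
      congr 1
      simp [List.getD_eq_getElem?_getD, List.getElem?_concat_length]

def pvFPm (s : List Char) (m : Bool) : List Nat :=
  if m then (pvFP s).filter (fun p => !(s.getD p ' ' == '_')) else pvFP s

lemma pvU_eq_fp (s : List Char) (m : Bool) :
    pvU s m = (pvFPm s m).map (fun p => s.getD p ' ') := by
  cases m
  · exact pvFP_ofList s
  · unfold pvU pvFPm
    rw [if_pos rfl, if_pos rfl, pvFP_ofList, List.filter_map]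
    rfl

lemma pvFPm_sub (s : List Char) (m : Bool) (p : Nat) (hp : p ∈ pvFPm s m) : p ∈ pvFP s := by
  cases m
  · exact hp
  · exact (List.mem_filter.1 hp).1

lemma pvFP_congr (s t : List Char) (hlen : t.length = s.length) (hPW : pvPW s t) :
    pvFP s = pvFP t := by
  unfold pvFP
  rw [hlen]
  apply List.filter_congr
  intro p _
  rw [Bool.eq_iff_iff]
  simp only [List.all_eq_true, List.mem_range, Bool.not_eq_true', beq_eq_false_iff_ne, ne_eq]
  constructor
  · intro h q hq he
    exact h q hq ((hPW q p).2 he)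
  · intro h q hq he
    exact h q hq ((hPW q p).1 he)

lemma pvFPm_congr (s t : List Char) (m : Bool) (hlen : t.length = s.length)
    (hAL : m = true → pvAL s t) (hPW : pvPW s t) : pvFPm s m = pvFPm t m := by
  cases m
  · exact pvFP_congr s t hlen hPW
  · unfold pvFPm
    rw [if_pos rfl, if_pos rfl, ← pvFP_congr s t hlen hPW]
    apply List.filter_congr
    intro p hp
    have hplt : p < s.length := ((pvFP_mem s p).1 hp).1
    have hplt' : p < t.length := by omega
    rw [List.getD_eq_getElem?_getD, List.getD_eq_getElem?_getD,
      List.getElem?_eq_getElem hplt, List.getElem?_eq_getElem hplt']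
    simp only [Option.getD_some]
    rw [Bool.eq_iff_iff]
    simp only [Bool.not_eq_true', beq_eq_false_iff_ne, ne_eq]
    have h2 := hAL rfl p
    rw [List.getElem?_eq_getElem hplt, List.getElem?_eq_getElem hplt'] at h2
    simp only [Option.some.injEq] at h2
    exact not_congr h2

lemma pvGetD_map (s : List Char) (F : List Nat) (i : Nat) (hi : i < F.length) :
    (F.map (fun p => s.getD p ' ')).getD i ' ' = s.getD (F.getD i 0) ' ' := by
  have hFi : F.getD i 0 = F[i] := by
    rw [List.getD_eq_getElem?_getD, List.getElem?_eq_getElem hi, Option.getD_some]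
  rw [List.getD_eq_getElem?_getD, List.getElem?_eq_getElem (by simpa using hi),
    List.getElem_map, Option.getD_some, hFi, List.getD_eq_getElem?_getD]

lemma pvCond_mpr (s t : List Char) (m : Bool) : pvBCond s t m → pvACond s t m := by
  rintro ⟨hlen, hAL, hPW⟩
  have hF : pvFPm s m = pvFPm t m := pvFPm_congr s t m hlen hAL hPW
  have hUs := pvU_eq_fp s m
  have hUt := pvU_eq_fp t m
  have hv : (pvU s m).map (fun c => (s.count c : Int)) = (pvU t m).map (fun c => (t.count c : Int)) := by
    rw [hUs, hUt, ← hF, List.map_map, List.map_map]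
    apply List.map_congr_left
    intro p hp
    have hps : p ∈ pvFP s := pvFPm_sub s m p hp
    have hplt : p < s.length := ((pvFP_mem s p).1 hps).1
    have hplt' : p < t.length := by omega
    have e1 : some (s.getD p ' ') = s[p]? := by
      rw [List.getD_eq_getElem?_getD, List.getElem?_eq_getElem hplt, Option.getD_some]
    have e2 : some (t.getD p ' ') = t[p]? := by
      rw [List.getD_eq_getElem?_getD, List.getElem?_eq_getElem hplt', Option.getD_some]
    simp only [Function.comp]
    congr 1
    rw [pvCount s _, pvCount t _, hlen]
    congr 1
    apply List.filter_congr
    intro q _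
    rw [Bool.eq_iff_iff, beq_iff_eq, beq_iff_eq, e1, e2]
    exact hPW q p
  refine ⟨hv, hlen, ?_⟩
  have hLen : (pvU s m).length = (pvU t m).length := by
    have := congrArg List.length hv
    simpa using this
  intro q
  cases hsq : s[q]? with
  | none =>
    rw [pvModel_none s t m q hsq]
    have := List.getElem?_eq_none_iff.1 hsq
    exact List.getElem?_eq_none (by omega)
  | some c =>
    by_cases hc : c ∈ pvU s m
    · obtain ⟨i, hi, hgd, hmq⟩ := pvModel_mem s t m q c hsq hc hLen
      rw [hmq]
      have hFt : (pvU t m).length = (pvFPm t m).length := by rw [hUt, List.length_map]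
      have hiFs : i < (pvFPm s m).length := by rw [hF, ← hFt]; exact hi
      have hiFt : i < (pvFPm t m).length := by rw [← hFt]; exact hi
      have hpmem : (pvFPm s m).getD i 0 ∈ pvFPm s m := pvGetD_mem _ _ _ hiFs
      have hps : (pvFPm s m).getD i 0 ∈ pvFP s := pvFPm_sub s m _ hpmem
      have hplt : (pvFPm s m).getD i 0 < s.length := ((pvFP_mem s _).1 hps).1
      have hplt' : (pvFPm s m).getD i 0 < t.length := by omega
      have hsp : s.getD ((pvFPm s m).getD i 0) ' ' = c := by
        rw [← pvGetD_map s (pvFPm s m) i hiFs, ← hUs]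
        exact hgd
      have hspq : s[(pvFPm s m).getD i 0]? = s[q]? := by
        rw [List.getElem?_eq_getElem hplt, hsq]
        have := hsp
        rw [List.getD_eq_getElem?_getD, List.getElem?_eq_getElem hplt, Option.getD_some] at this
        rw [this]
      have htq : t[q]? = t[(pvFPm s m).getD i 0]? := ((hPW _ q).1 hspq).symm
      have hrhs : (pvU t m).getD i ' ' = t.getD ((pvFPm s m).getD i 0) ' ' := by
        rw [hUt, pvGetD_map t (pvFPm t m) i hiFt, ← hF]
      have hgd2 : t.getD ((pvFPm s m).getD i 0) ' ' = t[(pvFPm s m).getD i 0] := by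
        rw [List.getD_eq_getElem?_getD, List.getElem?_eq_getElem hplt', Option.getD_some]
      rw [htq, List.getElem?_eq_getElem hplt', hrhs, hgd2]
    · obtain ⟨hm, hc'⟩ := pvMem_cases s m c (List.mem_of_getElem? hsq) hc
      subst hm
      subst hc'
      rw [pvModel_not_mem s t true q '_' hsq hc hLen, hsq]
      exact (hAL rfl q).1 hsq

lemma pvCond_iff (s t : List Char) (m : Bool) : pvACond s t m ↔ pvBCond s t m :=
  ⟨pvCond_mp s t m, pvCond_mpr s t m⟩

lemma pvMatch_eq (s t : List Char) (m : Bool) :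
    pvAMatch (pvNF s m) s t m = pvBMatch s t m := by
  rcases h : pvBMatch s t m
  · rcases h2 : pvAMatch (pvNF s m) s t m
    · rfl
    · exact absurd ((pvBMatch_iff s t m).2 ((pvCond_iff s t m).1 ((pvAMatch_iff s t m).1 h2))) (by simp [h])
  · exact (pvAMatch_iff s t m).2 ((pvCond_iff s t m).2 ((pvBMatch_iff s t m).1 h))

-- pvRetB decides exactly whether the scan returns at an entry with its value nonempty
lemma pvRetB_cons (s : List Char) (m : Bool) (k : String) (v0 : String) (vs : List String) :
    pvRetB s m (k, v0 :: vs) = ((v0 == "All") && pvBMatch s k.toList m) := by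
  unfold pvRetB
  rw [pvIsoB_eq_pvBMatch]
  simp

-- the two loops agree on any suffix of the keys, provided every empty value list in the
-- remaining entries is preceded (within the suffix) by a returning entry
lemma pvGo_eq (s : List Char) (m : Bool) (d : PySem.Dict String (List String))
    (hnd : d.keys.Nodup) (ks : List String) (hsub : ∀ k ∈ ks, k ∈ d.keys)
    (hok : ∀ j < ks.length, ((ks.map (fun k => (k, d.getD k []))).getD j ("", [])).2 = [] →
      ∃ i < j, pvRetB s m ((ks.map (fun k => (k, d.getD k []))).getD i ("", [])) = true) :
    pvAGo d ks (pvNF s m) s m = pvBGo (ks.map (fun k => (k, d.getD k []))) s m := by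
  induction ks with
  | nil => rfl
  | cons k rest ih =>
    have hv : d.getD k [] ≠ [] := by
      intro he
      obtain ⟨i, hi, -⟩ := hok 0 (by simp) (by simpa using he)
      omega
    obtain ⟨v0, vs, hval⟩ := List.exists_cons_of_ne_nil hv
    simp only [pvAGo, pvBGo, List.map_cons, hval]
    have hget : PySem.List.pyGet? (v0::vs) 0 = some v0 := by
      simpa using PySem.List.pyGet?_natCast (v0::vs) 0
    rw [hget, pvMatch_eq]
    have hret : pvRetB s m (k, d.getD k []) = ((v0 == "All") && pvBMatch s k.toList m) := by
      rw [hval]; exact pvRetB_cons s m k v0 vs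
    by_cases hR : ((v0 == "All") && pvBMatch s k.toList m) = true
    · rw [Bool.and_eq_true] at hR
      simp [hR.1, hR.2]
    · -- head does not return: propagate hok to the tail and recurse
      have hrest := ih (fun x hx => hsub x (List.mem_cons_of_mem _ hx))
        (by
          intro j hj hje
          obtain ⟨i, hi, hiR⟩ := hok (j + 1) (by simpa using Nat.succ_lt_succ hj)
            (by simpa using hje)
          cases i with
          | zero =>
            exfalso
            simp only [List.map_cons, List.getD_cons_zero] at hiR
            rw [hret] at hiR
            exact hR hiR
          | succ i' =>
            refine ⟨i', by omega, ?_⟩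
            simpa using hiR)
      by_cases hAll : (v0 == "All") = true
      · have hM : pvBMatch s k.toList m = false := by
          rcases hMc : pvBMatch s k.toList m
          · rfl
          · exact absurd (by rw [Bool.and_eq_true]; exact ⟨hAll, hMc⟩) hR
        simp [hAll, hM, hrest]
      · simp only [Bool.not_eq_true] at hAll
        simp [hAll, hrest]

-- ===== VERDICT (by name: the statement is the Claim_ definition above) =====
theorem findReplacable_spec : Claim_equal_findReplacable := by
  intro fm new m _ hpre
  unfold Spec_findReplacable
  have hnd := PySem.Dict.nodup_keys_ofList fm
  have hitems := PySem.Dict.items_eq_map_keys (PySem.Dict.ofList fm) hnd ([] : List String)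
  have h1 : findReplacable fm new m
      = pvAGo (PySem.Dict.ofList fm) (PySem.Dict.ofList fm).keys (pvNF new.toList m) new.toList m := rfl
  unfold Pre_findReplacable at hpre
  rw [hitems] at hpre
  rw [List.length_map] at hpre
  rw [h1, pvGo_eq new.toList m _ hnd _ (fun k hk => hk) hpre, ← hitems]
  rfl
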